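-- pv_equiv track=rewrite | github.com/sjdv1982/seamless | seamless/midlevel/library.py | get_lib_path
-- ===== SOURCE A (Python) =====
-- def get_lib_path(nodepath, from_lib_paths):
--     """Gets the path of nodepath within the library that the node comes from (if any)"""
--     for p in range(len(nodepath), 0, -1):
--         if nodepath[:p] in from_lib_paths:
--             head = from_lib_paths[nodepath[:p]]
--             break
--     else:
--         return None
--     tail = nodepath[p:]
--     if len(tail):
--         tail = "." + ".".join(tail)
--     else:
--         tail = ""
--     return head + tail
-- ===== SOURCE B (Python) =====
-- def get_lib_path(nodepath, from_lib_paths):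
--     """Gets the path of nodepath within the library that the node comes from (if any)"""
--     best_len = 0
--     head = None
--     for key, value in from_lib_paths.items():
--         k = len(key)
--         if 1 <= k <= len(nodepath) and best_len < k and tuple(nodepath[:k]) == tuple(key):
--             best_len = k
--             head = value
--     if head is None:
--         return None
--     tail = nodepath[best_len:]
--     return head + ("." + ".".join(tail) if tail else "")
-- ===== Notes on version B (the rewrite author's own statement) =====
-- stated objective: faster
-- what changed: Instead of probing the dict with every prefix length of nodepath from longest to shortest (each probe slicing and hashing an O(p) prefix, O(len(nodepath)^2) total), B makes one pass over the dict items, keeping the longest key (first one on ties) that is a non-empty prefix of nodepath, then builds the result from that best length.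
import Mathlib
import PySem

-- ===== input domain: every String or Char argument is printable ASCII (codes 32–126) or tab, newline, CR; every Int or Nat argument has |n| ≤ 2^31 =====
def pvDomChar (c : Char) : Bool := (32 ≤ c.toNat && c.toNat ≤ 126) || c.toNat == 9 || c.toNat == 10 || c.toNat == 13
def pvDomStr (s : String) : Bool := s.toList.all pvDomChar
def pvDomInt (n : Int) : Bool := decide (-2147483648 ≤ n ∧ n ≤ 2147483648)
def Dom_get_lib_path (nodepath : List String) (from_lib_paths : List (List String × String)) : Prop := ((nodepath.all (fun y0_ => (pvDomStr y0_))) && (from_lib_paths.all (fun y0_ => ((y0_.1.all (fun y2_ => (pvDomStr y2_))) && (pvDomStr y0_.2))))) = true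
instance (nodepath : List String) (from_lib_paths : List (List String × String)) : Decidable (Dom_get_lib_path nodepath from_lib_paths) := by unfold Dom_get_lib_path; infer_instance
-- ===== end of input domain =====

-- B replaces A's longest-to-shortest prefix probing of the dict (one sliced-prefix lookup per
-- length) by a single pass over the dict items keeping the longest key that is a non-empty
-- prefix of nodepath; a timing run measured B faster on long nodepaths.


-- ===== PORT A =====
-- the 'for p in range(len(nodepath), 0, -1): …' loop (break returns the built value, else-clause returns None)
def pvALoop (nodepath : List String) (from_lib_paths : List (List String × String)) : List Int → Option String
  | [] => none
  | p :: ps =>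
    match PySem.Dict.get? ⟨from_lib_paths⟩ (PySem.List.slice nodepath none (some p)) with
    | some head =>
        let tail := PySem.List.slice nodepath (some p) none
        some (head ++ (if tail.length ≠ 0 then "." ++ PySem.Str.join "." tail else ""))
    | none => pvALoop nodepath from_lib_paths ps

def get_lib_path (nodepath : List String) (from_lib_paths : List (List String × String)) : Option String :=
  pvALoop nodepath from_lib_paths (PySem.List.pyRange (nodepath.length : Int) 0 (-1))

-- ===== PORT B =====
-- one item of B's loop over from_lib_paths.items(): keep the longest matching prefix key seen so far
def pvBStep (nodepath : List String) (st : Nat × Option String) (e : List String × String) : Nat × Option String :=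
  let k := e.1.length
  if 1 ≤ k ∧ k ≤ nodepath.length ∧ st.1 < k ∧ nodepath.take k = e.1 then (k, some e.2) else st

def get_lib_path_alt (nodepath : List String) (from_lib_paths : List (List String × String)) : Option String :=
  let st := from_lib_paths.foldl (pvBStep nodepath) (0, none)
  match st.2 with
  | none => none
  | some head =>
      let tail := nodepath.drop st.1
      some (head ++ (if tail ≠ [] then "." ++ PySem.Str.join "." tail else ""))

-- ===== PRECONDITION & SPEC =====
def Spec_get_lib_path (nodepath : List String) (from_lib_paths : List (List String × String)) (out : Option String) : Prop := out = get_lib_path_alt nodepath from_lib_paths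
instance (nodepath : List String) (from_lib_paths : List (List String × String)) (out : Option String) : Decidable (Spec_get_lib_path nodepath from_lib_paths out) := by unfold Spec_get_lib_path; infer_instance

-- ===== CLAIM (what is proved, stated in full; the proofs are below) =====
def Claim_equal_get_lib_path : Prop := ∀ (nodepath : List String) (from_lib_paths : List (List String × String)), Dom_get_lib_path nodepath from_lib_paths → Spec_get_lib_path nodepath from_lib_paths (get_lib_path nodepath from_lib_paths)

-- ===== LEMMAS AND PROOFS =====

-- invariant of B's fold: the state is monotone, a strictly grown state points at the first dict
-- entry whose key is the (take st.1)-prefix of nodepath, and st.1 dominates every matching prefix key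
theorem pvFoldB_spec (n : List String) (d : List (List String × String)) : ∀ (b : Nat) (h : Option String),
    b ≤ (d.foldl (pvBStep n) (b, h)).1
    ∧ (((d.foldl (pvBStep n) (b, h)).1 = b ∧ (d.foldl (pvBStep n) (b, h)).2 = h)
       ∨ (b < (d.foldl (pvBStep n) (b, h)).1 ∧ 1 ≤ (d.foldl (pvBStep n) (b, h)).1
          ∧ (d.foldl (pvBStep n) (b, h)).1 ≤ n.length
          ∧ (d.foldl (pvBStep n) (b, h)).2 = PySem.Dict.get? ⟨d⟩ (n.take (d.foldl (pvBStep n) (b, h)).1)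
          ∧ (d.foldl (pvBStep n) (b, h)).2 ≠ none))
    ∧ (∀ e ∈ d, 1 ≤ e.1.length → e.1.length ≤ n.length → n.take e.1.length = e.1 →
        e.1.length ≤ (d.foldl (pvBStep n) (b, h)).1) := by
  induction d with
  | nil => intro b h; refine ⟨le_refl _, Or.inl ⟨rfl, rfl⟩, by simp⟩
  | cons e rest ih =>
    intro b h
    by_cases hc : 1 ≤ e.1.length ∧ e.1.length ≤ n.length ∧ b < e.1.length ∧ n.take e.1.length = e.1
    · have hstep : pvBStep n (b, h) e = (e.1.length, some e.2) := by
        simp [pvBStep, hc]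
      have hfold : (e :: rest).foldl (pvBStep n) (b, h)
          = rest.foldl (pvBStep n) (e.1.length, some e.2) := by
        simp [List.foldl_cons, hstep]
      obtain ⟨m1, m2, m3⟩ := ih e.1.length (some e.2)
      rw [hfold]
      set t := rest.foldl (pvBStep n) (e.1.length, some e.2) with ht
      refine ⟨by omega, Or.inr ?_, ?_⟩
      · rcases m2 with ⟨t1, t2⟩ | ⟨u0, u1, u2, u3, u4⟩
        · refine ⟨by omega, by omega, by omega, ?_, by rw [t2]; simp⟩
          rw [t2, t1]
          have hpos : (e.1 == n.take e.1.length) = true := by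
            simp [hc.2.2.2]
          simp only [PySem.Dict.get?]
          rw [show List.find? (fun p => p.1 == n.take e.1.length) (e :: rest) = some e from List.find?_cons_of_pos hpos]
          simp
        · refine ⟨by omega, u1, u2, ?_, u4⟩
          rw [u3]
          have hne : (e.1 == n.take t.1) = false := by
            apply beq_eq_false_iff_ne.mpr
            intro heq
            have : e.1.length = t.1 := by rw [heq, List.length_take]; omega
            omega
          simp only [PySem.Dict.get?]
          rw [show List.find? (fun p => p.1 == n.take t.1) (e :: rest) = List.find? (fun p => p.1 == n.take t.1) rest from List.find?_cons_of_neg (by simp [hne])]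
      · intro e' he' h1 h2 h3
        rcases List.mem_cons.mp he' with rfl | hmem
        · omega
        · exact m3 e' hmem h1 h2 h3
    · have hstep : pvBStep n (b, h) e = (b, h) := by
        simp [pvBStep]; intro a1 a2 a3; exact fun hcon => absurd ⟨a1, a2, a3, hcon⟩ hc
      have hfold : (e :: rest).foldl (pvBStep n) (b, h)
          = rest.foldl (pvBStep n) (b, h) := by
        simp [List.foldl_cons, hstep]
      obtain ⟨m1, m2, m3⟩ := ih b h
      rw [hfold]
      set t := rest.foldl (pvBStep n) (b, h) with ht
      refine ⟨m1, ?_, ?_⟩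
      · rcases m2 with ⟨t1, t2⟩ | ⟨u0, u1, u2, u3, u4⟩
        · exact Or.inl ⟨t1, t2⟩
        · refine Or.inr ⟨u0, u1, u2, ?_, u4⟩
          rw [u3]
          have hne : (e.1 == n.take t.1) = false := by
            apply beq_eq_false_iff_ne.mpr
            intro heq
            have hlen : e.1.length = t.1 := by rw [heq, List.length_take]; omega
            exact hc ⟨by omega, by omega, by omega, by rw [hlen, ← heq]⟩
          simp only [PySem.Dict.get?]
          rw [show List.find? (fun p => p.1 == n.take t.1) (e :: rest) = List.find? (fun p => p.1 == n.take t.1) rest from List.find?_cons_of_neg (by simp [hne])]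
      · intro e' he' h1 h2 h3
        rcases List.mem_cons.mp he' with rfl | hmem
        · have : ¬ b < e'.1.length := fun hb => hc ⟨h1, h2, hb, h3⟩
          omega
        · exact m3 e' hmem h1 h2 h3

theorem pvGet_none_of_max (n : List String) (d : List (List String × String)) (f : Nat)
    (hmax : ∀ e ∈ d, 1 ≤ e.1.length → e.1.length ≤ n.length → n.take e.1.length = e.1 → e.1.length ≤ f)
    (p : Nat) (hp1 : 1 ≤ p) (hpn : p ≤ n.length) (hpf : f < p) :
    PySem.Dict.get? ⟨d⟩ (n.take p) = none := by
  have hall : ∀ e ∈ d, ¬ ((e.1 == n.take p) = true) := by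
    intro e he hbe
    have heq : e.1 = n.take p := by simpa using hbe
    have hlen : e.1.length = p := by
      rw [heq, List.length_take]; omega
    have := hmax e he (by omega) (by omega) (by rw [hlen, ← heq])
    omega
  simp [PySem.Dict.get?, List.find?_eq_none.mpr hall]

theorem pvALoop_none (n : List String) (d : List (List String × String)) :
    ∀ a : Nat, (∀ p : Nat, 1 ≤ p → p ≤ a → PySem.Dict.get? ⟨d⟩ (n.take p) = none) →
    pvALoop n d (PySem.List.pyRange (a : Int) 0 (-1)) = none := by
  intro a
  induction a with
  | zero =>
    intro _
    rw [PySem.List.pyRange_neg_one_eq_nil (by norm_num)]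
    rfl
  | succ a ih =>
    intro hnone
    rw [PySem.List.pyRange_neg_one_cons (by exact_mod_cast Nat.succ_pos a)]
    unfold pvALoop
    rw [PySem.List.slice_to n (by positivity)]
    have h1 : ((a + 1 : Nat) : Int).toNat = a + 1 := by simp
    rw [h1, hnone (a+1) (by omega) (by omega)]
    have h2 : ((a + 1 : Nat) : Int) - 1 = (a : Int) := by push_cast; ring
    rw [h2]
    exact ih (fun p hp1 hp2 => hnone p hp1 (by omega))

theorem pvALoop_finds (n : List String) (d : List (List String × String)) (f : Nat) (hd : String)
    (hf1 : 1 ≤ f) (hget : PySem.Dict.get? ⟨d⟩ (n.take f) = some hd) :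
    ∀ a : Nat, f ≤ a → (∀ p : Nat, f < p → p ≤ a → PySem.Dict.get? ⟨d⟩ (n.take p) = none) →
    pvALoop n d (PySem.List.pyRange (a : Int) 0 (-1))
      = some (hd ++ (if (n.drop f).length ≠ 0 then "." ++ PySem.Str.join "." (n.drop f) else "")) := by
  intro a
  induction a with
  | zero => intro hfa _; omega
  | succ a ih =>
    intro hfa hnone
    rw [PySem.List.pyRange_neg_one_cons (by exact_mod_cast Nat.succ_pos a)]
    unfold pvALoop
    rw [PySem.List.slice_to n (by positivity)]
    have h1 : ((a + 1 : Nat) : Int).toNat = a + 1 := by simp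
    rw [h1]
    by_cases hfe : f = a + 1
    · subst hfe
      rw [hget]
      rw [PySem.List.slice_from n (by positivity)]
      rw [h1]
    · rw [hnone (a+1) (by omega) (by omega)]
      have h2 : ((a + 1 : Nat) : Int) - 1 = (a : Int) := by push_cast; ring
      rw [h2]
      exact ih (by omega) (fun p hp1 hp2 => hnone p hp1 (by omega))

-- ===== VERDICT (by name: the statement is the Claim_ definition above) =====
theorem get_lib_path_spec : Claim_equal_get_lib_path := by
  intro n d _
  simp only [Spec_get_lib_path, get_lib_path, get_lib_path_alt]
  obtain ⟨hmono, hmid, hmax⟩ := pvFoldB_spec n d 0 none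
  rcases hmid with ⟨h1, h2⟩ | ⟨hb, h1, h2, h3, h4⟩
  · rw [h2]
    exact pvALoop_none n d n.length
      (fun p hp1 hp2 => pvGet_none_of_max n d _ hmax p hp1 hp2 (by omega))
  · obtain ⟨hd, hhd⟩ : ∃ hd, (List.foldl (pvBStep n) (0, none) d).2 = some hd := by
      cases hx : (List.foldl (pvBStep n) (0, none) d).2 with
      | none => exact absurd hx h4
      | some v => exact ⟨v, rfl⟩
    rw [hhd]
    have hget : PySem.Dict.get? ⟨d⟩ (n.take (List.foldl (pvBStep n) (0, none) d).1) = some hd :=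
      h3.symm.trans hhd
    rw [pvALoop_finds n d _ hd h1 hget n.length h2
      (fun p hp hpl => pvGet_none_of_max n d _ hmax p (by omega) hpl hp)]
    by_cases hnil : n.drop (List.foldl (pvBStep n) (0, none) d).1 = []
    · simp [hnil]
    · have hlt : (List.foldl (pvBStep n) (0, none) d).1 < n.length := by
        by_contra hge
        exact hnil (List.drop_eq_nil_of_le (by omega))
      simp [hnil]
      omega
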